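-- pv_equiv track=rewrite | github.com/databricks-industry-solutions/dbxmetagen | src/dbxmetagen/metadata_generator.py | _check_list_and_dict_keys_match
-- ===== SOURCE A (Python) =====
-- def _check_list_and_dict_keys_match(dict_list, string_list):
--     if isinstance(dict_list, list):
--         dict_keys = dict_list
--     else:
--         try:
--             dict_keys = dict_list.keys()
--         except:
--             raise TypeError("dict_list is not a list or a dictionary")
--     list_matches_keys = all(item in dict_keys for item in string_list)
--     keys_match_list = all(key in string_list for key in dict_keys)
--     if not (list_matches_keys and keys_match_list):
--         return False
--     return True
-- ===== SOURCE B (Python) =====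
-- def _check_list_and_dict_keys_match(dict_list, string_list):
--     if isinstance(dict_list, list):
--         dict_keys = dict_list
--     else:
--         try:
--             dict_keys = dict_list.keys()
--         except:
--             raise TypeError("dict_list is not a list or a dictionary")
--     return set(string_list) == set(dict_keys)
-- ===== Notes on version B (the rewrite author's own statement) =====
-- stated objective: idiomatic
-- what changed: Replaces the two bidirectional all()-membership scans with a single set-equality test set(string_list) == set(dict_keys).
import Mathlib
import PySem

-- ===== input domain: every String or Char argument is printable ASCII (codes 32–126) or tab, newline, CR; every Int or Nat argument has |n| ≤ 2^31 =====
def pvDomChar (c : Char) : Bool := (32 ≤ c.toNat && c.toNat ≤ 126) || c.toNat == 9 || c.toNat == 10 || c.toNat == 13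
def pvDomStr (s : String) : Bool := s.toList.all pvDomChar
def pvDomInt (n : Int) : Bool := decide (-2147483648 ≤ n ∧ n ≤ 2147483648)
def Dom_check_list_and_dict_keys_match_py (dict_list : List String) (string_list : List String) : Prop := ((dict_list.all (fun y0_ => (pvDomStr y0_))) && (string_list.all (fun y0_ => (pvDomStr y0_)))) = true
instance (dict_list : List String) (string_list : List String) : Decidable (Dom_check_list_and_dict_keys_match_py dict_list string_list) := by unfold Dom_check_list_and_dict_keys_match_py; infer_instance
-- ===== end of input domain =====

-- B replaces A's two bidirectional all()-membership scans by a single set-equality test (idiomatic; same observable behaviour).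
-- ===== PORT A =====
-- Port of A. dict_list is typed List String so the isinstance(list) branch always holds.
def check_list_and_dict_keys_match_py (dict_list : List String) (string_list : List String) : Bool :=
  let dict_keys := dict_list
  let list_matches_keys := string_list.all (fun item => dict_keys.contains item)
  let keys_match_list := dict_keys.all (fun key => string_list.contains key)
  if !(list_matches_keys && keys_match_list) then false else true

-- ===== PORT B =====
-- Port of B: set(string_list) == set(dict_keys).
def check_list_and_dict_keys_match_py_alt (dict_list : List String) (string_list : List String) : Bool :=
  let dict_keys := dict_list
  PySem.Set.equal (PySem.Set.ofList string_list) (PySem.Set.ofList dict_keys)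

-- ===== PRECONDITION & SPEC =====
def Spec_check_list_and_dict_keys_match_py (dict_list : List String) (string_list : List String) (out : Bool) : Prop := out = check_list_and_dict_keys_match_py_alt dict_list string_list
instance (dict_list : List String) (string_list : List String) (out : Bool) : Decidable (Spec_check_list_and_dict_keys_match_py dict_list string_list out) := by unfold Spec_check_list_and_dict_keys_match_py; infer_instance

-- ===== CLAIM (what is proved, stated in full; the proofs are below) =====
def Claim_equal_check_list_and_dict_keys_match_py : Prop := ∀ (dict_list : List String) (string_list : List String), Dom_check_list_and_dict_keys_match_py dict_list string_list → Spec_check_list_and_dict_keys_match_py dict_list string_list (check_list_and_dict_keys_match_py dict_list string_list)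

-- ===== LEMMAS AND PROOFS =====

-- ===== VERDICT (by name: the statement is the Claim_ definition above) =====
theorem check_list_and_dict_keys_match_py_spec : Claim_equal_check_list_and_dict_keys_match_py := by
  intro dict_list string_list _
  unfold Spec_check_list_and_dict_keys_match_py
  unfold check_list_and_dict_keys_match_py check_list_and_dict_keys_match_py_alt
  have key : ((string_list.all (fun item => dict_list.contains item)
        && dict_list.all (fun key => string_list.contains key)) = true)
      ↔ (PySem.Set.equal (PySem.Set.ofList string_list) (PySem.Set.ofList dict_list) = true) := by
    rw [PySem.Set.equal_iff]
    simp only [Bool.and_eq_true, List.all_eq_true, List.contains_iff_mem, PySem.Set.mem_ofList]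
    constructor
    · rintro ⟨h1, h2⟩ x
      exact ⟨fun hx => h1 x hx, fun hx => h2 x hx⟩
    · intro h
      exact ⟨fun x hx => (h x).1 hx, fun x hx => (h x).2 hx⟩
  cases hab : (string_list.all (fun item => dict_list.contains item)
        && dict_list.all (fun key => string_list.contains key)) with
  | false =>
    have : PySem.Set.equal (PySem.Set.ofList string_list) (PySem.Set.ofList dict_list) = false := by
      rw [← Bool.not_eq_true, ← key, hab]; simp
    simp only [hab, this, Bool.not_false, if_true]
  | true =>
    simp only [hab, key.mp hab, Bool.not_true, Bool.false_eq_true, if_false]
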